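-- pv_equiv track=rewrite | github.com/woorog/Baekjoon | 백준/Silver/11279. 최대 힙/최대 힙.py | max_heap_operations
-- ===== SOURCE A (Python) =====
-- import heapq
--
-- def max_heap_operations(ops):
--     heap = []
--     result = []
--
--     for op in ops:
--         if op == 0:
--             if heap:
--                 # 최대값 추출 (실제로는 최소 힙에서 최소값을 추출하고, 부호를 바꿈)
--                 result.append(-heapq.heappop(heap))
--             else:
--                 # 힙이 비어 있으면 0 출력
--                 result.append(0)
--         else:
--             # 새 요소를 최소 힙에 추가 (부호를 바꿔서 최대 힙처럼 동작하게 함)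
--             heapq.heappush(heap, -op)
--
--     return result
-- ===== SOURCE B (Python) =====
-- import bisect
--
-- def max_heap_operations(ops):
--     xs = []      # kept sorted ascending; maximum is the tail
--     res = []
--     for op in ops:
--         if op == 0:
--             res.append(xs.pop() if xs else 0)
--         else:
--             bisect.insort(xs, op)
--     return res
-- ===== Notes on version B (the rewrite author's own statement) =====
-- stated objective: simpler
-- what changed: Replaces the negated heapq min-heap with a plain ascending sorted list maintained by bisect.insort, popping the tail element as the maximum (sorted-order insertion instead of heap sift, no sign flipping).
import Mathlib
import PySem

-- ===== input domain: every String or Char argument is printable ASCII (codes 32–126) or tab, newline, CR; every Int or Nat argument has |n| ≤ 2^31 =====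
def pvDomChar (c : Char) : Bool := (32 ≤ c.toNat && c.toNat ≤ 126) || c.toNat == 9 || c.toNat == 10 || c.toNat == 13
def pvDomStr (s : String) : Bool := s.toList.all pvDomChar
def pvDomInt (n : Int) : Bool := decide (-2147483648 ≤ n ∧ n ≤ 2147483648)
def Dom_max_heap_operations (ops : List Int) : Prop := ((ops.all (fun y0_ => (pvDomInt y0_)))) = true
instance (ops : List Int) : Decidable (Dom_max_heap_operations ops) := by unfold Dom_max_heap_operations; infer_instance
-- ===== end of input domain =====

-- B replaces A's heapq-based max-heap (negated min-heap) by a plain ascending sorted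
-- list maintained with bisect.insort, popping the tail for the maximum: simpler code,
-- same outputs since each extraction returns the maximum of the stored multiset.

-- ===== PORT A =====
-- heapq is a binary min-heap library; its push/pop are ported as a merge-based
-- min-heap (exact on the returned values: each heappop returns the minimum of the
-- stored multiset, which is all A's result ever observes).
inductive PHeap : Type where
  | nil : PHeap
  | node : Int → PHeap → PHeap → PHeap
deriving DecidableEq, Repr

def PHeap.merge : PHeap → PHeap → PHeap
  | .nil, h => h
  | h, .nil => h
  | .node x l1 r1, .node y l2 r2 =>
    if x ≤ y then .node x (PHeap.merge r1 (.node y l2 r2)) l1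
    else .node y (PHeap.merge r2 (.node x l1 r1)) l2
termination_by a b => sizeOf a + sizeOf b
decreasing_by all_goals (simp; try omega)

def heappush (h : PHeap) (v : Int) : PHeap := PHeap.merge h (.node v .nil .nil)

-- the loop of A: for op in ops …
def heapLoop : List Int → PHeap → List Int → List Int
  | [], _, res => res
  | op :: rest, h, res =>
    if op = 0 then
      match h with
      | .nil => heapLoop rest .nil (res ++ [0])
      | .node x l r => heapLoop rest (PHeap.merge l r) (res ++ [-x])
    else heapLoop rest (heappush h (-op)) res

def max_heap_operations (ops : List Int) : List Int := heapLoop ops .nil []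

-- ===== PORT B =====
-- bisect.insort into an ascending list (insert after equal elements)
def insortB (v : Int) : List Int → List Int
  | [] => [v]
  | y :: ys => if v < y then v :: y :: ys else y :: insortB v ys

-- the loop of B: for op in ops …
def sortLoop : List Int → List Int → List Int → List Int
  | [], _, res => res
  | op :: rest, xs, res =>
    if op = 0 then
      match xs with
      | [] => sortLoop rest [] (res ++ [0])
      | y :: ys => sortLoop rest (y :: ys).dropLast (res ++ [(y :: ys).getLast (by simp)])
    else sortLoop rest (insortB op xs) res

def max_heap_operations_alt (ops : List Int) : List Int := sortLoop ops [] []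

-- ===== PRECONDITION & SPEC =====
def Spec_max_heap_operations (ops : List Int) (out : List Int) : Prop := out = max_heap_operations_alt ops
instance (ops : List Int) (out : List Int) : Decidable (Spec_max_heap_operations ops out) := by unfold Spec_max_heap_operations; infer_instance

-- ===== CLAIM (what is proved, stated in full; the proofs are below) =====
def Claim_equal_max_heap_operations : Prop := ∀ (ops : List Int), Dom_max_heap_operations ops → Spec_max_heap_operations ops (max_heap_operations ops)

-- ===== LEMMAS AND PROOFS =====

def PHeap.toMultiset : PHeap → Multiset Int
  | .nil => 0
  | .node x l r => x ::ₘ (l.toMultiset + r.toMultiset)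

def IsHeap : PHeap → Prop
  | .nil => True
  | .node x l r => IsHeap l ∧ IsHeap r ∧ ∀ y ∈ l.toMultiset + r.toMultiset, x ≤ y

theorem merge_toMultiset (a b : PHeap) :
    (PHeap.merge a b).toMultiset = a.toMultiset + b.toMultiset := by
  fun_induction PHeap.merge a b with
  | case1 h => simp [PHeap.toMultiset]
  | case2 h _ => simp [PHeap.toMultiset]
  | case3 x l1 r1 y l2 r2 hle ih =>
    simp only [PHeap.toMultiset, ih]
    ext z
    simp only [Multiset.count_cons, Multiset.count_add]
    omega
  | case4 x l1 r1 y l2 r2 hle ih =>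
    simp only [PHeap.toMultiset, ih]
    ext z
    simp only [Multiset.count_cons, Multiset.count_add]
    omega

theorem merge_isHeap {a b : PHeap} (ha : IsHeap a) (hb : IsHeap b) :
    IsHeap (PHeap.merge a b) := by
  fun_induction PHeap.merge a b with
  | case1 h => exact hb
  | case2 h _ => exact ha
  | case3 x l1 r1 y l2 r2 hle ih =>
    obtain ⟨hl1, hr1, hbd1⟩ := ha
    refine ⟨ih hr1 hb, hl1, ?_⟩
    intro z hz
    rw [merge_toMultiset] at hz
    simp only [Multiset.mem_add] at hz
    rcases hz with (hz | hz) | hz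
    · exact hbd1 z (by simp [hz])
    · rw [show (PHeap.node y l2 r2).toMultiset = y ::ₘ (l2.toMultiset + r2.toMultiset) from rfl] at hz
      rcases Multiset.mem_cons.1 hz with hz | hz
      · omega
      · exact le_trans hle (hb.2.2 z hz)
    · exact hbd1 z (by simp [hz])
  | case4 x l1 r1 y l2 r2 hle ih =>
    obtain ⟨hl2, hr2, hbd2⟩ := hb
    refine ⟨ih hr2 ha, hl2, ?_⟩
    intro z hz
    rw [merge_toMultiset] at hz
    simp only [Multiset.mem_add] at hz
    rcases hz with (hz | hz) | hz
    · exact hbd2 z (by simp [hz])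
    · rw [show (PHeap.node x l1 r1).toMultiset = x ::ₘ (l1.toMultiset + r1.toMultiset) from rfl] at hz
      rcases Multiset.mem_cons.1 hz with hz | hz
      · omega
      · exact le_trans (by omega) (ha.2.2 z hz)
    · exact hbd2 z (by simp [hz])

theorem heappush_isHeap {h : PHeap} (hh : IsHeap h) (v : Int) : IsHeap (heappush h v) :=
  merge_isHeap hh (by refine ⟨trivial, trivial, ?_⟩; intro y hy; simp [PHeap.toMultiset] at hy)

theorem heappush_toMultiset (h : PHeap) (v : Int) :
    (heappush h v).toMultiset = v ::ₘ h.toMultiset := by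
  simp only [heappush, merge_toMultiset, PHeap.toMultiset]
  ext z
  simp only [Multiset.count_cons, Multiset.count_add, Multiset.count_zero]
  omega

theorem insortB_perm (v : Int) (xs : List Int) : List.Perm (insortB v xs) (v :: xs) := by
  induction xs with
  | nil => simp [insortB]
  | cons y ys ih =>
    simp only [insortB]
    split
    · exact List.Perm.refl _
    · exact (ih.cons y).trans (List.Perm.swap v y ys)

theorem insortB_sorted {xs : List Int} (hs : List.Pairwise (· ≤ ·) xs) (v : Int) :
    List.Pairwise (· ≤ ·) (insortB v xs) := by
  induction xs with
  | nil => simp [insortB]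
  | cons y ys ih =>
    rcases List.pairwise_cons.1 hs with ⟨hy, hys⟩
    simp only [insortB]
    split
    · refine List.pairwise_cons.2 ⟨?_, hs⟩
      intro b hb
      rcases List.mem_cons.1 hb with rfl | hb
      · omega
      · exact le_trans (by omega) (hy b hb)
    · refine List.pairwise_cons.2 ⟨?_, ih hys⟩
      intro b hb
      rcases List.mem_cons.1 ((insortB_perm v ys).mem_iff.1 hb) with rfl | hb
      · omega
      · exact hy b hb

theorem toMultiset_eq_zero {h : PHeap} (hz : h.toMultiset = 0) : h = .nil := by
  cases h with
  | nil => rfl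
  | node x l r => simp [PHeap.toMultiset] at hz

theorem sorted_le_getLast {xs : List Int} (hs : List.Pairwise (· ≤ ·) xs) {a : Int}
    (ha : a ∈ xs) (hne : xs ≠ []) : a ≤ xs.getLast hne := by
  induction xs with
  | nil => cases ha
  | cons y ys ih =>
    rcases List.pairwise_cons.1 hs with ⟨hy, hys⟩
    cases ys with
    | nil =>
      simp only [List.mem_singleton] at ha
      simp [ha]
    | cons z zs =>
      rw [List.getLast_cons (by simp)]
      rcases List.mem_cons.1 ha with rfl | ha
      · exact hy _ (List.getLast_mem (by simp))
      · exact ih hys ha (by simp)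

theorem loop_eq (ops : List Int) (h : PHeap) (xs res : List Int)
    (hh : IsHeap h) (hs : List.Pairwise (· ≤ ·) xs)
    (hm : h.toMultiset = ((xs.map (fun a => -a)) : Multiset Int)) :
    heapLoop ops h res = sortLoop ops xs res := by
  induction ops generalizing h xs res with
  | nil => simp [heapLoop, sortLoop]
  | cons op rest ih =>
    simp only [heapLoop, sortLoop]
    by_cases hop : op = 0
    · simp only [if_pos hop]
      cases xs with
      | nil =>
        have : h = .nil := toMultiset_eq_zero (by simpa using hm)
        subst this
        exact ih .nil [] _ trivial List.Pairwise.nil (by simp [PHeap.toMultiset])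
      | cons y ys =>
        cases h with
        | nil =>
          exfalso
          rw [show PHeap.nil.toMultiset = 0 from rfl] at hm
          have := congrArg Multiset.card hm
          simp at this
        | node x l r =>
          have hne : (y :: ys) ≠ [] := by simp
          have hxmem : x ∈ PHeap.toMultiset (.node x l r) := by simp [PHeap.toMultiset]
          have hxin : -x ∈ (y :: ys) := by
            rw [hm] at hxmem
            simp only [Multiset.mem_coe, List.mem_map] at hxmem
            obtain ⟨a, ha, hax⟩ := hxmem
            have : a = -x := by omega
            rwa [← this]
          have hLmem : (y :: ys).getLast hne ∈ (y :: ys) := List.getLast_mem hne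
          have hxL : x ≤ -((y :: ys).getLast hne) := by
            have : -((y :: ys).getLast hne) ∈ PHeap.toMultiset (.node x l r) := by
              rw [hm]
              simp only [Multiset.mem_coe, List.mem_map]
              exact ⟨_, hLmem, rfl⟩
            simp only [PHeap.toMultiset, Multiset.mem_cons, Multiset.mem_add] at this
            rcases this with h1 | h1
            · omega
            · exact hh.2.2 _ (by simpa using h1)
          have hLx : -x ≤ (y :: ys).getLast hne := sorted_le_getLast hs hxin hne
          have hxeq : x = -((y :: ys).getLast hne) := by omega
          have hperm : List.Perm ((y :: ys).map (fun a => -a))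
              ((-(y :: ys).getLast hne) :: (y :: ys).dropLast.map (fun a => -a)) := by
            have h0 : List.Perm (y :: ys) ((y :: ys).getLast hne :: (y :: ys).dropLast) := by
              conv_lhs => rw [← List.dropLast_append_getLast hne]
              exact List.perm_append_comm
            simpa using h0.map (fun a => -a)
          have hm' : (PHeap.merge l r).toMultiset =
              (((y :: ys).dropLast.map (fun a => -a)) : Multiset Int) := by
            have h1 : x ::ₘ (l.toMultiset + r.toMultiset) =
                x ::ₘ (((y :: ys).dropLast.map (fun a => -a)) : Multiset Int) := by
              rw [show x ::ₘ (l.toMultiset + r.toMultiset) = PHeap.toMultiset (.node x l r) from rfl,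
                hm, Multiset.coe_eq_coe.2 hperm, ← hxeq]
              rfl
            rw [merge_toMultiset]
            exact (Multiset.cons_inj_right x).1 h1
          show heapLoop rest (PHeap.merge l r) (res ++ [-x]) =
              sortLoop rest (y :: ys).dropLast (res ++ [(y :: ys).getLast hne])
          rw [show -x = (y :: ys).getLast hne by omega]
          exact ih (PHeap.merge l r) (y :: ys).dropLast _
            (merge_isHeap hh.1 hh.2.1)
            (List.Pairwise.sublist (List.dropLast_sublist _) hs) hm'
    · rw [if_neg hop, if_neg hop]
      refine ih (heappush h (-op)) (insortB op xs) res (heappush_isHeap hh _)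
        (insortB_sorted hs op) ?_
      rw [heappush_toMultiset, hm, Multiset.coe_eq_coe.2 ((insortB_perm op xs).map (fun a => -a))]
      simp

-- ===== VERDICT (by name: the statement is the Claim_ definition above) =====
theorem max_heap_operations_spec : Claim_equal_max_heap_operations := by
  intro ops _
  unfold Spec_max_heap_operations max_heap_operations max_heap_operations_alt
  exact loop_eq ops .nil [] [] trivial List.Pairwise.nil (by simp [PHeap.toMultiset])
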